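-- pv_equiv track=rewrite | github.com/DancingOnAir/LeetcodePythonSolution | String/3016_minimum_number_of_pushes_to_type_word_ii.py | minimumPushes1
-- ===== SOURCE A (Python) =====
-- from collections import Counter
--
-- def minimumPushes1(word: str) -> int:
--     freq = sorted(Counter(word).items(), key=lambda x: -x[1])
--     res, cnt = 0, 0
--     for k, v in freq:
--         cnt += 1
--         if cnt < 9:
--             res += v
--         elif cnt < 17:
--             res += v * 2
--         elif cnt < 25:
--             res += v * 3
--         else:
--             res += v * 4
--     return res
-- ===== SOURCE B (Python) =====
-- from collections import Counter
--
-- def weight_upto(n: int) -> int: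
--     # total push-cost of the first n keypad slots (slot i costs i//8 + 1)
--     return n + max(n - 8, 0) + max(n - 16, 0) + max(n - 24, 0)
--
-- def minimumPushes1(word: str) -> int:
--     # No sorting: for each distinct frequency value v, the letters having it occupy
--     # the contiguous rank block [g, g+t) where g = number of letters with a larger
--     # count; their total cost is v * (weight_upto(g+t) - weight_upto(g)).
--     tiers = Counter(Counter(word).values())  # frequency value -> number of letters with it
--     res = 0
--     for v, t in tiers.items():
--         g = sum(t2 for v2, t2 in tiers.items() if v2 > v)
--         res += v * (weight_upto(g + t) - weight_upto(g))
--     return res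
-- ===== Notes on version B (the rewrite author's own statement) =====
-- stated objective: alternative
-- what changed: B never sorts: it builds a Counter of the frequency values and, for each distinct frequency v, counts the letters with a strictly larger frequency to locate v's contiguous rank block [g, g+t), adding v times the closed-form block cost weight_upto(g+t)-weight_upto(g); A instead sorts letters by frequency and walks them with a running counter and an if/elif tier cascade.
import Mathlib
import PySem

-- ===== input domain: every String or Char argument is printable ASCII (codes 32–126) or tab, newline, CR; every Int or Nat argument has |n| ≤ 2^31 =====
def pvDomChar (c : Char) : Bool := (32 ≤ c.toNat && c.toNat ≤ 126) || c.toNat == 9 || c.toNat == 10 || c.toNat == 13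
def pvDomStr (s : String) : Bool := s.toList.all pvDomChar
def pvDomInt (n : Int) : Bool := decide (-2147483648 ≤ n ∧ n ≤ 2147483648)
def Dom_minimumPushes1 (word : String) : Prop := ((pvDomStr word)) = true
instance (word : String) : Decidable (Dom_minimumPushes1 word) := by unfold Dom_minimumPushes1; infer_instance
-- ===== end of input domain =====

-- B replaces A's sort-then-cascade pass with a sortless rank-by-counting scheme: for each
-- distinct frequency value it locates its contiguous rank block by counting larger
-- frequencies and adds the block's closed-form cost; objective: alternative.

-- ===== PORT A =====
def minimumPushes1 (word : String) : Int :=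
  let freq := PySem.List.sorted (PySem.Dict.counter word.toList).items (fun x => -x.2) false
  (freq.foldl (fun (rc : Int × Int) kv =>
      let cnt := rc.2 + 1
      if cnt < 9 then (rc.1 + kv.2, cnt)
      else if cnt < 17 then (rc.1 + kv.2 * 2, cnt)
      else if cnt < 25 then (rc.1 + kv.2 * 3, cnt)
      else (rc.1 + kv.2 * 4, cnt)) ((0 : Int), (0 : Int))).1

-- ===== PORT B =====
-- helper of Source B: total push-cost of the first n keypad slots (slot i costs i//8 + 1)
def pvWeightUpto (n : Int) : Int := n + max (n - 8) 0 + max (n - 16) 0 + max (n - 24) 0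

def minimumPushes1_alt (word : String) : Int :=
  let tiers := PySem.Dict.counter (PySem.Dict.counter word.toList).values
  tiers.items.foldl (fun res vt =>
    let g := ((tiers.items.filter (fun x => vt.1 < x.1)).map (fun x => x.2)).sum
    res + vt.1 * (pvWeightUpto (g + vt.2) - pvWeightUpto g)) 0

-- ===== PRECONDITION & SPEC =====
def Spec_minimumPushes1 (word : String) (out : Int) : Prop := out = minimumPushes1_alt word
instance (word : String) (out : Int) : Decidable (Spec_minimumPushes1 word out) := by unfold Spec_minimumPushes1; infer_instance

-- ===== CLAIM (what is proved, stated in full; the proofs are below) =====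
def Claim_equal_minimumPushes1 : Prop := ∀ (word : String), Dom_minimumPushes1 word → Spec_minimumPushes1 word (minimumPushes1 word)

-- ===== LEMMAS AND PROOFS =====

-- zero-based-position weighted sum that A's fold computes
def pvW : List Int → Nat → Int
  | [], _ => 0
  | v :: t, n =>
      v * (if n < 8 then 1 else if n < 16 then 2 else if n < 24 then 3 else 4) + pvW t (n + 1)

theorem pvFoldA (l : List (Char × Int)) (res : Int) (n : Nat) :
    (l.foldl (fun (rc : Int × Int) kv =>
      let cnt := rc.2 + 1
      if cnt < 9 then (rc.1 + kv.2, cnt)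
      else if cnt < 17 then (rc.1 + kv.2 * 2, cnt)
      else if cnt < 25 then (rc.1 + kv.2 * 3, cnt)
      else (rc.1 + kv.2 * 4, cnt)) (res, (n : Int))).1
    = res + pvW (l.map (·.2)) n := by
  induction l generalizing res n with
  | nil => simp [pvW]
  | cons p t ih =>
    have hcast : ((n : Int) + 1) = ((n + 1 : Nat) : Int) := by push_cast; ring
    rw [List.foldl_cons, List.map_cons]
    show (List.foldl _ (if (n : Int) + 1 < 9 then (res + p.2, (n : Int) + 1)
        else if (n : Int) + 1 < 17 then (res + p.2 * 2, (n : Int) + 1)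
        else if (n : Int) + 1 < 25 then (res + p.2 * 3, (n : Int) + 1)
        else (res + p.2 * 4, (n : Int) + 1)) t).1 = _
    rw [hcast]
    unfold pvW
    split_ifs <;> rw [ih] <;> first
      | ring1
      | (exfalso; omega)

theorem pvW_eq_drops (vs : List Int) (n : Nat) :
    pvW vs n = vs.sum + (vs.drop (8 - n)).sum + (vs.drop (16 - n)).sum + (vs.drop (24 - n)).sum := by
  induction vs generalizing n with
  | nil => simp [pvW]
  | cons v t ih =>
    have hd : ∀ (m : Nat), ((v :: t).drop (m - n)).sum
        = (if n < m then (t.drop (m - (n + 1))).sum else v + (t.drop (m - (n + 1))).sum) := by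
      intro m
      by_cases h : n < m
      · have : m - n = (m - (n + 1)) + 1 := by omega
        simp [h, this]
      · have h1 : m - n = 0 := by omega
        have h2 : m - (n + 1) = 0 := by omega
        simp [h, h1, h2]
    simp only [pvW, ih, List.sum_cons, hd 8, hd 16, hd 24]
    split_ifs <;> first
      | ring1
      | (exfalso; omega)

-- the sorted-descending value list that A effectively weights
theorem pvSortedEq (word : String) :
    (PySem.List.sorted (PySem.Dict.counter word.toList).items (fun x : Char × Int => -x.2) false).map (·.2)
      = PySem.List.sorted (PySem.Dict.counter word.toList).values (fun v : Int => v) true := by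
  set its := (PySem.Dict.counter word.toList).items with hits
  have hperm1 : ((PySem.List.sorted its (fun x : Char × Int => -x.2) false).map (·.2)).Perm
      (its.map (·.2)) :=
    (PySem.List.sorted_perm its (fun x : Char × Int => -x.2) false).map _
  have hperm2 : (PySem.List.sorted (its.map (·.2)) (fun v : Int => v) true).Perm (its.map (·.2)) :=
    PySem.List.sorted_perm _ _ _
  have hs1 : ((PySem.List.sorted its (fun x : Char × Int => -x.2) false).map (·.2)).Pairwise
      (fun a b : Int => b ≤ a) := by
    have := PySem.List.sorted_pairwise its (fun x : Char × Int => -x.2)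
    exact List.Pairwise.map _ (fun a b h => by simpa using h) this
  have hs2 : (PySem.List.sorted (its.map (·.2)) (fun v : Int => v) true).Pairwise
      (fun a b : Int => b ≤ a) := by
    simpa using PySem.List.sorted_pairwise_rev (its.map (·.2)) (fun v : Int => v)
  have hvals : (PySem.Dict.counter word.toList).values = its.map (·.2) := rfl
  rw [hvals]
  exact List.Perm.eq_of_pairwise (fun a b _ _ h1 h2 => le_antisymm h2 h1) hs1 hs2 (hperm1.trans hperm2.symm)

-- the m-th tier contribution of a distinct value v, relative to the multiset vs
def pvTermM (vs : List Int) (m : Nat) (v : Int) : Int :=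
  v * (max ((vs.countP (fun x => decide (v < x)) : Int) + (vs.count v : Int) - (m : Int)) 0
        - max ((vs.countP (fun x => decide (v < x)) : Int) - (m : Int)) 0)

-- key lemma: for a descending vs and any nodup list K of its distinct elements,
-- the sum beyond the first m slots equals the summed block contributions
theorem pvL : ∀ (n : Nat) (vs K : List Int), vs.length ≤ n →
    vs.Pairwise (fun a b => b ≤ a) → K.Nodup → (∀ x, x ∈ K ↔ x ∈ vs) →
    ∀ (m : Nat), (vs.drop m).sum = (K.map (pvTermM vs m)).sum := by
  intro n
  induction n with
  | zero =>
    intro vs K hlen _ _ hmem m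
    have hvs : vs = [] := List.eq_nil_of_length_eq_zero (Nat.le_zero.mp hlen)
    subst hvs
    have hK : K = [] := List.eq_nil_iff_forall_not_mem.mpr (fun x hx => by simpa using (hmem x).mp hx)
    simp [hK]
  | succ n ih =>
    intro vs K hlen hs hnd hmem m
    cases vs with
    | nil =>
      have hK : K = [] := List.eq_nil_iff_forall_not_mem.mpr (fun x hx => by simpa using (hmem x).mp hx)
      simp [hK]
    | cons v tl =>
      have hle : ∀ x ∈ v :: tl, x ≤ v := by
        intro x hx
        rcases List.mem_cons.mp hx with h | h
        · exact le_of_eq h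
        · exact (List.pairwise_cons.mp hs).1 x h
      -- split vs into its leading block of copies of v and the strictly smaller rest
      have hRS : (v :: tl).takeWhile (fun x => x == v) ++ (v :: tl).dropWhile (fun x => x == v)
          = v :: tl := List.takeWhile_append_dropWhile
      set R := (v :: tl).takeWhile (fun x : Int => x == v) with hRdef
      set S := (v :: tl).dropWhile (fun x : Int => x == v) with hSdef
      have hRrep : R = List.replicate R.length v :=
        List.eq_replicate_of_mem (fun b hb => by
          have := List.mem_takeWhile_imp hb
          simpa using this)
      have hRpos : 0 < R.length := by
        rw [hRdef, List.takeWhile_cons_of_pos (by simp)]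
        simp
      have hSpair : S.Pairwise (fun a b : Int => b ≤ a) :=
        hs.sublist (List.dropWhile_sublist _)
      have hSlt : ∀ x ∈ S, x < v := by
        cases hS2 : S with
        | nil => intro x hx; cases hx
        | cons s ss =>
          have hd : (v :: tl).dropWhile (fun x : Int => x == v) = s :: ss := hSdef ▸ hS2
          have hw : (v :: tl).dropWhile (fun x : Int => x == v) ≠ [] := by rw [hd]; simp
          have hps := List.head_dropWhile_not (fun x : Int => x == v) hw
          have hhead : ((v :: tl).dropWhile (fun x : Int => x == v)).head hw = s := by
            simp [hd]
          rw [hhead] at hps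
          have hsne : s ≠ v := by simpa using hps
          have hsmem : s ∈ v :: tl := (List.dropWhile_sublist _).mem (by rw [hd]; simp)
          have hslt : s < v := lt_of_le_of_ne (hle s hsmem) hsne
          intro x hx
          rcases List.mem_cons.mp hx with h | h
          · exact h ▸ hslt
          · have hp := hSpair
            rw [hS2] at hp
            exact lt_of_le_of_lt ((List.pairwise_cons.mp hp).1 x h) hslt
      have hSnotv : v ∉ S := fun h => absurd (hSlt v h) (lt_irrefl v)
      have hcountv : (v :: tl).count v = R.length := by
        rw [← hRS, List.count_append, List.count_eq_zero.mpr hSnotv]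
        rw [hRrep]
        simp
      have hcountP0 : (v :: tl).countP (fun x => decide (v < x)) = 0 :=
        List.countP_eq_zero.mpr (fun a ha => by simpa using not_lt_of_ge (hle a ha))
      have hvK : v ∈ K := (hmem v).mpr (by simp)
      have hmem' : ∀ x, x ∈ K.erase v ↔ x ∈ S := by
        intro x
        rw [hnd.mem_erase_iff]
        constructor
        · rintro ⟨hxv, hxK⟩
          have hxvs := (hmem x).mp hxK
          rw [← hRS] at hxvs
          rcases List.mem_append.mp hxvs with h | h
          · exact absurd (by rw [hRrep] at h; exact List.eq_of_mem_replicate h) hxv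
          · exact h
        · intro hxS
          exact ⟨(hSlt x hxS).ne, (hmem x).mpr (by rw [← hRS]; exact List.mem_append_right _ hxS)⟩
      have hlen' : R.length + S.length = tl.length + 1 := by
        have := congrArg List.length hRS
        simpa using this
      have hSlen : S.length ≤ n := by
        simp only [List.length_cons] at hlen
        omega
      have hIH := ih S (K.erase v) hSlen hSpair (hnd.erase v) hmem' (m - R.length)
      -- counts in vs reduce to counts in S for elements of S
      have hcu : ∀ u ∈ S, (v :: tl).count u = S.count u := by
        intro u hu
        rw [← hRS, List.count_append, hRrep, List.count_replicate]
        simp [(hSlt u hu).ne']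
      have hcPu : ∀ u ∈ S, (v :: tl).countP (fun x => decide (u < x))
          = R.length + S.countP (fun x => decide (u < x)) := by
        intro u hu
        rw [← hRS, List.countP_append, hRrep, List.countP_replicate]
        simp [hSlt u hu]
      -- terms of vs at m agree with terms of S at m - R.length on K.erase v
      have hterm : ∀ u ∈ K.erase v, pvTermM (v :: tl) m u = pvTermM S (m - R.length) u := by
        intro u huK
        have hu : u ∈ S := (hmem' u).mp huK
        unfold pvTermM
        rw [hcu u hu, hcPu u hu]
        congr 1
        push_cast
        omega
      -- the term of v itself
      have htermv : pvTermM (v :: tl) m v = ((R.length - m : Nat) : Int) * v := by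
        unfold pvTermM
        rw [hcountv, hcountP0]
        rw [show max ((((0:Nat)) : Int) + (R.length : Int) - (m : Int)) 0
              - max ((((0:Nat)) : Int) - (m : Int)) 0 = ((R.length - m : Nat) : Int) from by
          push_cast; omega]
        ring
      -- decompose both sides along the block split
      have hKperm : K.Perm (v :: K.erase v) := List.perm_cons_erase hvK
      calc ((v :: tl).drop m).sum
          = ((R ++ S).drop m).sum := by rw [hRS]
        _ = ((R.length - m : Nat) : Int) * v + (S.drop (m - R.length)).sum := by
            rw [List.drop_append, List.sum_append, hRrep, List.drop_replicate,
              List.sum_replicate, List.length_replicate]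
            rw [nsmul_eq_mul]
        _ = pvTermM (v :: tl) m v + ((K.erase v).map (pvTermM S (m - R.length))).sum := by
            rw [htermv, hIH]
        _ = pvTermM (v :: tl) m v + ((K.erase v).map (pvTermM (v :: tl) m)).sum := by
            rw [List.map_congr_left hterm]
        _ = (K.map (pvTermM (v :: tl) m)).sum := by
            rw [(hKperm.map (pvTermM (v :: tl) m)).sum_eq]
            simp
-- combined: summing the four tiers' block contributions over the distinct values
theorem pvMain (vs K : List Int) (hs : vs.Pairwise (fun a b => b ≤ a)) (hnd : K.Nodup)
    (hmem : ∀ x, x ∈ K ↔ x ∈ vs) :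
    (K.map (fun v => v *
        (pvWeightUpto ((vs.countP (fun x => decide (v < x)) : Int) + (vs.count v : Int))
          - pvWeightUpto ((vs.countP (fun x => decide (v < x)) : Int))))).sum
      = vs.sum + (vs.drop 8).sum + (vs.drop 16).sum + (vs.drop 24).sum := by
  have hsplit : ∀ v : Int, v *
        (pvWeightUpto ((vs.countP (fun x => decide (v < x)) : Int) + (vs.count v : Int))
          - pvWeightUpto ((vs.countP (fun x => decide (v < x)) : Int)))
      = pvTermM vs 0 v + (pvTermM vs 8 v + (pvTermM vs 16 v + pvTermM vs 24 v)) := by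
    intro v
    unfold pvTermM pvWeightUpto
    have key : ∀ a b : Int, 0 ≤ a → 0 ≤ b →
        (a + b + max (a + b - 8) 0 + max (a + b - 16) 0 + max (a + b - 24) 0)
          - (a + max (a - 8) 0 + max (a - 16) 0 + max (a - 24) 0)
        = (max (a + b - ((0:Nat):Int)) 0 - max (a - ((0:Nat):Int)) 0)
          + ((max (a + b - ((8:Nat):Int)) 0 - max (a - ((8:Nat):Int)) 0)
          + ((max (a + b - ((16:Nat):Int)) 0 - max (a - ((16:Nat):Int)) 0)
          + (max (a + b - ((24:Nat):Int)) 0 - max (a - ((24:Nat):Int)) 0))) :=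
      fun a b ha hb => by push_cast; omega
    rw [key _ _ (Int.natCast_nonneg _) (Int.natCast_nonneg _)]
    ring
  rw [List.map_congr_left (fun v _ => hsplit v)]
  rw [PySem.List.sum_map_add_int, PySem.List.sum_map_add_int, PySem.List.sum_map_add_int]
  have h0 := pvL vs.length vs K le_rfl hs hnd hmem 0
  have h8 := pvL vs.length vs K le_rfl hs hnd hmem 8
  have h16 := pvL vs.length vs K le_rfl hs hnd hmem 16
  have h24 := pvL vs.length vs K le_rfl hs hnd hmem 24
  simp only [List.drop_zero] at h0
  rw [← h0, ← h8, ← h16, ← h24]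
  ring

-- counting larger values over the distinct elements IS countP over the multiset
theorem pvCountSum (vals : List Int) (p : Int → Bool) :
    (((PySem.Set.ofList vals).filter p).map (fun v => ((vals.count v : Nat) : Int))).sum
      = ((vals.countP p : Nat) : Int) := by
  have hperm : (PySem.Set.ofList vals).Perm vals.dedup :=
    (List.perm_ext_iff_of_nodup (PySem.Set.nodup_ofList vals) (List.nodup_dedup vals)).mpr
      (fun x => by rw [PySem.Set.mem_ofList, List.mem_dedup])
  have h := ((hperm.filter p).map (fun v => ((vals.count v : Nat) : Int))).sum_eq
  rw [h]
  rw [show (fun v => ((vals.count v : Nat) : Int)) = (fun n => ((n : Nat) : Int)) ∘ (vals.count ·)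
    from rfl]
  rw [← List.map_map, ← Nat.cast_list_sum]
  rw [List.sum_map_count_dedup_filter_eq_countP p vals]

-- ===== VERDICT (by name: the statement is the Claim_ definition above) =====
theorem minimumPushes1_spec : Claim_equal_minimumPushes1 := by
  intro word _
  unfold Spec_minimumPushes1
  set vals := (PySem.Dict.counter word.toList).values with hvals
  set vs := PySem.List.sorted vals (fun v : Int => v) true with hvs
  have hp : vs.Perm vals := PySem.List.sorted_perm _ _ _
  have hspair : vs.Pairwise (fun a b : Int => b ≤ a) := by
    simpa using PySem.List.sorted_pairwise_rev vals (fun v : Int => v)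
  -- A's value
  have hA : minimumPushes1 word = vs.sum + (vs.drop 8).sum + (vs.drop 16).sum + (vs.drop 24).sum := by
    unfold minimumPushes1
    have hfold := pvFoldA
      (PySem.List.sorted (PySem.Dict.counter word.toList).items (fun x : Char × Int => -x.2) false)
      0 0
    simp only [Nat.cast_zero] at hfold
    rw [hfold, zero_add, pvSortedEq word, pvW_eq_drops]
  -- B's value
  have hB : minimumPushes1_alt word =
      ((PySem.Set.ofList vals).map (fun v => v *
        (pvWeightUpto ((vals.countP (fun x => decide (v < x)) : Int) + (vals.count v : Int))
          - pvWeightUpto ((vals.countP (fun x => decide (v < x)) : Int))))).sum := by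
    simp only [minimumPushes1_alt]
    rw [PySem.Dict.items_counter vals]
    rw [PySem.List.foldl_add _ (fun vt : Int × Int =>
      vt.1 * (pvWeightUpto (((((PySem.Set.ofList vals).map (fun k => (k, ((vals.count k : Nat) : Int)))).filter
            (fun x => vt.1 < x.1)).map (fun x => x.2)).sum + vt.2)
        - pvWeightUpto ((((PySem.Set.ofList vals).map (fun k => (k, ((vals.count k : Nat) : Int)))).filter
            (fun x => vt.1 < x.1)).map (fun x => x.2)).sum)) 0]
    rw [zero_add, List.map_map]
    apply congrArg List.sum
    apply List.map_congr_left
    intro v _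
    have hg : ((((PySem.Set.ofList vals).map (fun k => (k, ((vals.count k : Nat) : Int)))).filter
          (fun x : Int × Int => v < x.1)).map (fun x => x.2)).sum
        = ((vals.countP (fun x => decide (v < x)) : Nat) : Int) := by
      rw [List.filter_map, List.map_map]
      exact pvCountSum vals (fun x => decide (v < x))
    simp only [Function.comp]
    rw [hg]
  rw [hA, hB]
  -- transfer the counts from vals to vs and conclude with pvMain
  have hcongr : ∀ v ∈ PySem.Set.ofList vals,
      v * (pvWeightUpto ((vals.countP (fun x => decide (v < x)) : Int) + (vals.count v : Int))
          - pvWeightUpto ((vals.countP (fun x => decide (v < x)) : Int)))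
      = v * (pvWeightUpto ((vs.countP (fun x => decide (v < x)) : Int) + (vs.count v : Int))
          - pvWeightUpto ((vs.countP (fun x => decide (v < x)) : Int))) := by
    intro v _
    rw [hp.countP_eq (fun x => decide (v < x)), hp.count_eq v]
  rw [List.map_congr_left hcongr]
  exact (pvMain vs (PySem.Set.ofList vals) hspair (PySem.Set.nodup_ofList vals)
    (fun x => by rw [PySem.Set.mem_ofList, hp.mem_iff])).symm
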